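-- pv_equiv track=rewrite | github.com/akaraci/Makine-Ogrenmesi | 6Kfold/Kfold.py | verisayisi
-- ===== SOURCE A (Python) =====
-- def verisayisi(y):
--     pozitif,negatif=0,0
--     for tuty in y:
--         if tuty==1:
--             pozitif+=1
--         elif tuty==2:
--             negatif+=1
--     return pozitif,negatif
-- ===== SOURCE B (Python) =====
-- from bisect import bisect_left, bisect_right
--
-- def verisayisi(y):
--     ys = sorted(y)
--     pozitif = bisect_right(ys, 1) - bisect_left(ys, 1)
--     negatif = bisect_right(ys, 2) - bisect_left(ys, 2)
--     return pozitif, negatif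
-- ===== Notes on version B (the rewrite author's own statement) =====
-- stated objective: alternative
-- what changed: B sorts y and computes each count as bisect_right minus bisect_left (binary search for the boundaries of the runs of 1s and 2s in the sorted copy), replacing A's single-pass if/elif accumulator loop.
import Mathlib
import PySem

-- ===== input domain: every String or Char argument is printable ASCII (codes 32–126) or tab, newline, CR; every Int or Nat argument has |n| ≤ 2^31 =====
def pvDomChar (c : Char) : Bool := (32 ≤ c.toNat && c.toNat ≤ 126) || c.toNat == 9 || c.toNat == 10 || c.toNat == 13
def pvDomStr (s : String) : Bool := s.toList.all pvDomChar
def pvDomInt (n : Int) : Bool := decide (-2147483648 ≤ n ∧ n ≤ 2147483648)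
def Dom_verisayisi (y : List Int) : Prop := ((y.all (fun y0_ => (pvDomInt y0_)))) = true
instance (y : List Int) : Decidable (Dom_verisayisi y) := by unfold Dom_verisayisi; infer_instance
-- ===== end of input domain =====

-- B sorts a copy of y and reads each count off as bisect_right - bisect_left (alternative algorithm, same results).

-- ===== PORT A =====
-- A: pozitif,negatif accumulated over y with if/elif in one loop.
def verisayisiStep (st : Int × Int) (tuty : Int) : Int × Int :=
  if tuty == 1 then (st.1 + 1, st.2)
  else if tuty == 2 then (st.1, st.2 + 1)
  else st

def verisayisi (y : List Int) : Int × Int :=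
  y.foldl verisayisiStep (0, 0)

-- ===== PORT B =====
-- B: ys = sorted(y); counts are bisect_right(ys,v) - bisect_left(ys,v) for v = 1, 2.
def verisayisi_alt (y : List Int) : Int × Int :=
  let ys := PySem.List.sorted y (fun x => x) false
  let pozitif : Int := (PySem.List.bisectRight ys 1 : Int) - (PySem.List.bisectLeft ys 1 : Int)
  let negatif : Int := (PySem.List.bisectRight ys 2 : Int) - (PySem.List.bisectLeft ys 2 : Int)
  (pozitif, negatif)

-- ===== PRECONDITION & SPEC =====
def Spec_verisayisi (y : List Int) (out : Int × Int) : Prop := out = verisayisi_alt y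
instance (y : List Int) (out : Int × Int) : Decidable (Spec_verisayisi y out) := by unfold Spec_verisayisi; infer_instance

-- ===== CLAIM (what is proved, stated in full; the proofs are below) =====
def Claim_equal_verisayisi : Prop := ∀ (y : List Int), Dom_verisayisi y → Spec_verisayisi y (verisayisi y)

-- ===== LEMMAS AND PROOFS =====

-- ===== VERDICT (by name: the statement is the Claim_ definition above) =====
-- On a sorted (Pairwise ≤) list, bisect_right - bisect_left is the number of occurrences.
theorem bisect_sub_eq_count (xs : List Int) (x : Int)
    (hs : xs.Pairwise (fun a b => a ≤ b)) :
    (PySem.List.bisectRight xs x : Int) - (PySem.List.bisectLeft xs x : Int) = xs.count x := by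
  obtain ⟨hLlen, hLlt, hLge⟩ := PySem.List.bisectLeft_spec xs x hs
  obtain ⟨hRlen, hRle, hRgt⟩ := PySem.List.bisectRight_spec xs x hs
  set L := PySem.List.bisectLeft xs x with hL
  set R := PySem.List.bisectRight xs x with hR
  have hLR : L ≤ R := by
    by_contra hlt
    have hRL : R < L := Nat.lt_of_not_le hlt
    have hRlt : R < xs.length := lt_of_lt_of_le hRL hLlen
    have h1 := hLlt R hRlt hRL
    have h2 := hRgt R hRlt (le_refl R)
    omega
  -- decompose xs into take L ++ middle ++ drop R
  have hmidlen : ((xs.drop L).take (R - L)).length = R - L := by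
    simp; omega
  have hmid : (xs.drop L).take (R - L) = List.replicate (R - L) x := by
    apply List.ext_getElem
    · simp [hmidlen]
    · intro j hj _
      rw [hmidlen] at hj
      have hjR : L + j < R := by omega
      have hlen : L + j < xs.length := by omega
      have hle1 : x ≤ xs[L + j] := hLge (L + j) hlen (by omega)
      have hle2 : xs[L + j] ≤ x := hRle (L + j) hlen (by omega)
      simp [List.getElem_take, List.getElem_drop]
      omega
  have htake : ∀ a ∈ xs.take L, a ≠ x := by
    intro a ha
    rw [List.mem_iff_getElem] at ha
    obtain ⟨j, hj, rfl⟩ := ha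
    have hjL : j < L := by simpa using lt_of_lt_of_le hj (by simp)
    have hjlen : j < xs.length := by omega
    have := hLlt j hjlen hjL
    simp at *
    omega
  have hdrop : ∀ a ∈ xs.drop R, a ≠ x := by
    intro a ha
    rw [List.mem_iff_getElem] at ha
    obtain ⟨j, hj, rfl⟩ := ha
    have hjlen : R + j < xs.length := by simp at hj; omega
    have := hRgt (R + j) hjlen (by omega)
    simp [List.getElem_drop] at *
    omega
  have hxs : xs = xs.take L ++ ((xs.drop L).take (R - L) ++ (xs.drop L).drop (R - L)) := by
    rw [List.take_append_drop, List.take_append_drop]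
  have hdd : (xs.drop L).drop (R - L) = xs.drop R := by
    rw [List.drop_drop]; congr 1; omega
  have hcount : xs.count x = R - L := by
    conv_lhs => rw [hxs]
    rw [List.count_append, List.count_append, hmid, hdd,
      List.count_replicate, List.count_eq_zero.mpr, List.count_eq_zero.mpr]
    · simp
    · intro h; exact hdrop x h rfl
    · intro h; exact htake x h rfl
  rw [hcount]
  omega

-- A's fold, started from any state, adds the counts of 1 and 2 componentwise.
theorem verisayisi_fold (y : List Int) (a b : Int) :
    y.foldl verisayisiStep (a, b) = (a + y.count 1, b + y.count 2) := by
  induction y generalizing a b with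
  | nil => simp
  | cons h t ih =>
    rw [List.foldl_cons]
    by_cases h1 : h = 1
    · subst h1
      rw [show verisayisiStep (a, b) 1 = (a + 1, b) from rfl, ih]
      simp; ring
    · by_cases h2 : h = 2
      · subst h2
        rw [show verisayisiStep (a, b) 2 = (a, b + 1) from rfl, ih]
        simp; ring
      · have hs : verisayisiStep (a, b) h = (a, b) := by
          simp [verisayisiStep, h1, h2]
        rw [hs, ih]
        simp [h1, h2]

theorem verisayisi_main (y : List Int) : verisayisi y = verisayisi_alt y := by
  have hs := PySem.List.sorted_pairwise (xs := y) (key := fun x => x)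
  have hp : (PySem.List.sorted y (fun x => x) false).Perm y := PySem.List.sorted_perm ..
  simp only [verisayisi, verisayisi_alt, verisayisi_fold,
    bisect_sub_eq_count _ _ hs, hp.count_eq]
  simp

-- ===== VERDICT (by name: the statement is the Claim_ definition above) =====
theorem verisayisi_spec : Claim_equal_verisayisi := by
  intro y _
  exact verisayisi_main y
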